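-- pv_equiv track=rewrite | github.com/mrigankpawagi/ProbeableProblems | code/q1/buggy/16_1.py | least_positive_index
-- ===== SOURCE A (Python) =====
-- def least_positive_index(lst):
--     # Initialize variables to store the minimum positive integer and its index
--     min_positive = float('inf')
--     min_positive_index = -1
--
--     # Iterate through the list
--     for i, num in enumerate(lst):
--         # Check if the number is positive and smaller than the current minimum positive
--         if num > 0 and num < min_positive:
--             min_positive = num
--             min_positive_index = i
--
--     return min_positive_index
-- ===== SOURCE B (Python) =====
-- def least_positive_index(lst):
--     positives = [x for x in lst if x > 0]
--     if not positives:
--         return -1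
--     return lst.index(min(positives))
-- ===== Notes on version B (the rewrite author's own statement) =====
-- stated objective: simpler
-- what changed: Replaces the fused running-minimum-with-index loop by two separate passes: filter the positives, take their min, and locate it with lst.index (first occurrence matches A's strict < tie-breaking).
import Mathlib
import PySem

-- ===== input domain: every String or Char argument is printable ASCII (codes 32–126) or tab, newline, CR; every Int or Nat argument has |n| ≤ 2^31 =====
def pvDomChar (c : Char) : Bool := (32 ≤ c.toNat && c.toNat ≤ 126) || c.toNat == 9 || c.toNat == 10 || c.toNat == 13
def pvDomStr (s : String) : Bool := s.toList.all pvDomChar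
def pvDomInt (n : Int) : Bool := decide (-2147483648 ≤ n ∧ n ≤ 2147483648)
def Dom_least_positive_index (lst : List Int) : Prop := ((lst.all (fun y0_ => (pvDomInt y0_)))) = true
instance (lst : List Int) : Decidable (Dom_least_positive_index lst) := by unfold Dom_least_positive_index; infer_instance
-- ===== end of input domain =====

-- B replaces A's fused running-minimum loop by three separate passes (filter positives, min, lst.index); objective: simpler.

-- ===== PORT A =====
-- Python's float('inf') sentinel is modelled as `none` (num < inf is always true).
def pvStepA (st : Option Int × Int) (p : Int × Int) : Option Int × Int :=
  if decide (0 < p.2) && (match st.1 with | none => true | some m => decide (p.2 < m)) then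
    (some p.2, p.1)
  else st

def least_positive_index (lst : List Int) : Int :=
  ((PySem.List.enumerate lst 0).foldl pvStepA (none, -1)).2

-- ===== PORT B =====
def least_positive_index_alt (lst : List Int) : Int :=
  let positives := lst.filter (fun x => decide (0 < x))
  match PySem.List.min? positives (fun x => x) with
  | none => -1
  | some m =>
    match PySem.List.index? lst m with
    | some i => (i : Int)
    | none => -1   -- unreachable: min of the positives is an element of lst

-- ===== PRECONDITION & SPEC =====
def Spec_least_positive_index (lst : List Int) (out : Int) : Prop := out = least_positive_index_alt lst
instance (lst : List Int) (out : Int) : Decidable (Spec_least_positive_index lst out) := by unfold Spec_least_positive_index; infer_instance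

-- ===== CLAIM (what is proved, stated in full; the proofs are below) =====
def Claim_equal_least_positive_index : Prop := ∀ (lst : List Int), Dom_least_positive_index lst → Spec_least_positive_index lst (least_positive_index lst)

-- ===== LEMMAS AND PROOFS =====

theorem pv_enumerate_append (l t : List Int) (s : Int) :
    PySem.List.enumerate (l ++ t) s = PySem.List.enumerate l s ++ PySem.List.enumerate t (s + l.length) := by
  induction l generalizing s with
  | nil => simp [PySem.List.enumerate_nil]
  | cons x xs ih =>
      simp [PySem.List.enumerate_cons, ih, add_assoc]
      ring_nf

theorem pv_min?_append_singleton (P : List Int) (x : Int) :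
    PySem.List.min? (P ++ [x]) (fun y => y)
      = some (match PySem.List.min? P (fun y => y) with | none => x | some m => min m x) := by
  cases P with
  | nil => simp [PySem.List.min?]
  | cons h t => simp [PySem.List.min?_id_cons, List.foldl_append]

-- A's loop state after processing l equals (min of the positives of l, B's answer on l).
theorem pv_A_char (l : List Int) :
    (PySem.List.enumerate l 0).foldl pvStepA (none, -1)
      = (PySem.List.min? (l.filter (fun x => decide (0 < x))) (fun x => x),
         least_positive_index_alt l) := by
  induction l using List.reverseRecOn with
  | nil => simp [PySem.List.enumerate_nil, least_positive_index_alt, PySem.List.min?]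
  | append_singleton l x ih =>
      rw [pv_enumerate_append, List.foldl_append, ih]
      simp only [PySem.List.enumerate_cons, PySem.List.enumerate_nil, List.foldl_cons,
        List.foldl_nil, zero_add]
      unfold least_positive_index_alt
      by_cases hx : 0 < x
      · simp only [List.filter_append, List.filter_cons, decide_eq_true hx, if_pos,
          List.filter_nil]
        rw [pv_min?_append_singleton]
        rcases hm : PySem.List.min? (l.filter (fun y => decide (0 < y))) (fun y => y) with _ | m
        · -- no positives in l: the new element becomes the minimum
          have hP : l.filter (fun y => decide (0 < y)) = [] :=
            (PySem.List.min?_eq_none_iff _ _).mp hm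
          have hxl : x ∉ l := by
            intro hmem
            have hx' : x ∈ l.filter (fun y => decide (0 < y)) := by
              simp [List.mem_filter, hmem, hx]
            simp [hP] at hx'
          simp only []
          rw [PySem.List.index?_append_singleton_self _ _ hxl]
          simp [pvStepA, hx]
        · -- l has positives with first minimum m
          have hml : m ∈ l := (List.mem_filter.mp (PySem.List.min?_mem hm)).1
          by_cases hlt : x < m
          · have hxl : x ∉ l := by
              intro hmem'
              have hx' : x ∈ l.filter (fun y => decide (0 < y)) := by
                simp [List.mem_filter, hmem', hx]
              have h2 := PySem.List.min?_isMin hm x hx'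
              simp at h2; omega
            have hxm : min m x = x := min_eq_right hlt.le
            simp only [hxm]
            rw [PySem.List.index?_append_singleton_self _ _ hxl]
            simp [pvStepA, hx, hlt]
          · have hxm : min m x = m := min_eq_left (by omega)
            simp only [hxm]
            rw [PySem.List.index?_append_of_mem _ hml]
            simp [pvStepA, hx, hlt]
      · -- x is not positive: state and positives unchanged
        simp only [List.filter_append, List.filter_cons, decide_eq_false hx, List.filter_nil,
          Bool.false_eq_true, if_false, List.append_nil]
        rcases hm : PySem.List.min? (l.filter (fun y => decide (0 < y))) (fun y => y) with _ | m
        · simp [pvStepA, hx]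
        · have hml : m ∈ l := (List.mem_filter.mp (PySem.List.min?_mem hm)).1
          have h := PySem.List.index?_append_of_mem (l := l) [x] hml
          simp only [PySem.List.index?_eq_idxOf?] at h
          simp [pvStepA, hx, h]

-- ===== VERDICT (by name: the statement is the Claim_ definition above) =====
theorem least_positive_index_spec : Claim_equal_least_positive_index := by
  intro lst _
  unfold Spec_least_positive_index least_positive_index
  rw [pv_A_char]
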